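-- pv_equiv track=rewrite | github.com/LT-IntroToAI-SY2526/assignment-1-intro-to-python-lsjose973 | a1.py | categorize_grades
-- ===== SOURCE A (Python) =====
-- def categorize_grades(grades):
--     lst = []
--     for grade in grades:
--         if grade >= 90:
--             lst.append("A")
--         elif grade >= 80 and grade < 90:
--             lst.append("B")
--         elif grade >= 70 and grade < 80:
--             lst.append("C")
--         elif grade >= 60 and grade < 70:
--             lst.append("D")
--         else:
--             lst.append("F")
--     return lst
-- ===== SOURCE B (Python) =====
-- import bisect
--
-- _THRESHOLDS = [60, 70, 80, 90]
-- _LETTERS = ["F", "D", "C", "B", "A"]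
--
-- def categorize_grades(grades):
--     return [_LETTERS[bisect.bisect_right(_THRESHOLDS, g)] for g in grades]
-- ===== Notes on version B (the rewrite author's own statement) =====
-- stated objective: idiomatic
-- what changed: Replaces the five-way if-elif ladder with a sorted cutoff table and bisect_right bucket lookup, mapping each grade to letters[idx] in a list comprehension.
import Mathlib
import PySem

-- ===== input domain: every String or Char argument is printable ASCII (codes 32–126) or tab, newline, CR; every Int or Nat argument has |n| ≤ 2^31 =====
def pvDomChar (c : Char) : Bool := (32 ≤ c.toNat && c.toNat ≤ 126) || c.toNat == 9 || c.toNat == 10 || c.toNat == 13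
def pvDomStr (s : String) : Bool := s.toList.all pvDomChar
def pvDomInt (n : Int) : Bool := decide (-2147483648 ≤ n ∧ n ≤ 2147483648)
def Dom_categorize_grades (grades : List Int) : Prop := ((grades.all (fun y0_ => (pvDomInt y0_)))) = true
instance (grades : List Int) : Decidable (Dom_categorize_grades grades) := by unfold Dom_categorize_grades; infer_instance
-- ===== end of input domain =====

-- B replaces A's if-elif ladder by a sorted-cutoffs table with a bisect_right bucket lookup (idiomatic, same O(n)).


-- ===== PORT A =====
-- Port of A: left fold appending the letter chosen by the if-elif ladder.
def categorize_grades (grades : List Int) : List String :=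
  grades.foldl (fun lst grade =>
    lst ++ [if grade >= 90 then "A"
            else if grade >= 80 && grade < 90 then "B"
            else if grade >= 70 && grade < 80 then "C"
            else if grade >= 60 && grade < 70 then "D"
            else "F"]) []

-- ===== PORT B =====
-- Port of B: bisect.bisect_right on a sorted table, ported by its contract
-- (insertion point = number of elements <= x, exact for sorted lists).
def pvBisectRight (xs : List Int) (x : Int) : Nat :=
  (xs.filter (fun t => t <= x)).length

def categorize_grades_alt (grades : List Int) : List String :=
  grades.map (fun g => (["F", "D", "C", "B", "A"]).getD (pvBisectRight [60, 70, 80, 90] g) "F")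

-- ===== PRECONDITION & SPEC =====
def Spec_categorize_grades (grades : List Int) (out : List String) : Prop := out = categorize_grades_alt grades
instance (grades : List Int) (out : List String) : Decidable (Spec_categorize_grades grades out) := by unfold Spec_categorize_grades; infer_instance

-- ===== CLAIM (what is proved, stated in full; the proofs are below) =====
def Claim_equal_categorize_grades : Prop := ∀ (grades : List Int), Dom_categorize_grades grades → Spec_categorize_grades grades (categorize_grades grades)

-- ===== LEMMAS AND PROOFS =====

-- ===== VERDICT (by name: the statement is the Claim_ definition above) =====
-- per-element agreement of the ladder with the table lookup
theorem pv_elem_eq (g : Int) :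
    (if g >= 90 then "A"
     else if g >= 80 && g < 90 then "B"
     else if g >= 70 && g < 80 then "C"
     else if g >= 60 && g < 70 then "D"
     else "F")
    = (["F", "D", "C", "B", "A"]).getD (pvBisectRight [60, 70, 80, 90] g) "F" := by
  simp only [pvBisectRight, List.filter_cons, List.filter_nil]
  split_ifs <;> simp_all [decide_eq_true_eq] <;> omega

theorem pv_fold_eq (grades : List Int) (acc : List String) :
    grades.foldl (fun lst grade =>
      lst ++ [if grade >= 90 then "A"
              else if grade >= 80 && grade < 90 then "B"
              else if grade >= 70 && grade < 80 then "C"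
              else if grade >= 60 && grade < 70 then "D"
              else "F"]) acc
    = acc ++ grades.map (fun g => (["F", "D", "C", "B", "A"]).getD (pvBisectRight [60, 70, 80, 90] g) "F") := by
  induction grades generalizing acc with
  | nil => simp
  | cons g gs ih => rw [List.foldl_cons, ih, List.map_cons, pv_elem_eq g]; simp



theorem categorize_grades_spec : Claim_equal_categorize_grades := by
  intro grades _
  unfold Spec_categorize_grades categorize_grades categorize_grades_alt
  simpa using pv_fold_eq grades []
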